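-- pv_equiv track=rewrite | github.com/Freddsle/rosalind_tasks | task_014/solution.py | strings_comparison
-- ===== SOURCE A (Python) =====
-- import itertools
--
-- def find_longes_prefix(template_string, haystack, begin, haystack_len):
--     for i, letter_template in enumerate(template_string):
--         if haystack_len > begin+i:
--             if letter_template != haystack[begin+i]:
--                 return i
--         else:
--             return i
--     return i + 1
--
-- def strings_comparison(needle, haystack):
--     for c, template_string in enumerate(needle):
--         last_pos = []
--         haystack_len = len(haystack)
--         new_needle = needle
--         for begin in range(haystack_len):
--             last_pos.append(find_longes_prefix(template_string, haystack, begin, haystack_len))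
--         new_needle[c] = template_string[:max(last_pos)]
--     return [a[0] for a in itertools.groupby(sorted(new_needle))]
-- ===== SOURCE B (Python) =====
-- def strings_comparison(needle, haystack):
--     def best(s):
--         # longest prefix of s occurring as a substring of haystack:
--         # occurrence is monotone in prefix length, so grow k while it still occurs
--         k = 0
--         while k < len(s) and s[:k + 1] in haystack:
--             k += 1
--         return s[:k]
--     return sorted(set(best(s) for s in needle))
-- ===== Notes on version B (the rewrite author's own statement) =====
-- stated objective: faster
-- what changed: Instead of scanning every start position of the haystack and taking the max common-prefix length per needle, B grows the prefix length k while s[:k+1] is still a substring of the haystack (occurrence is monotone in prefix length), and dedups with sorted(set(...)) instead of sorted+groupby; Pre_ excludes only inputs where A raises (empty needle list / empty haystack / an empty needle string).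
import Mathlib
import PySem

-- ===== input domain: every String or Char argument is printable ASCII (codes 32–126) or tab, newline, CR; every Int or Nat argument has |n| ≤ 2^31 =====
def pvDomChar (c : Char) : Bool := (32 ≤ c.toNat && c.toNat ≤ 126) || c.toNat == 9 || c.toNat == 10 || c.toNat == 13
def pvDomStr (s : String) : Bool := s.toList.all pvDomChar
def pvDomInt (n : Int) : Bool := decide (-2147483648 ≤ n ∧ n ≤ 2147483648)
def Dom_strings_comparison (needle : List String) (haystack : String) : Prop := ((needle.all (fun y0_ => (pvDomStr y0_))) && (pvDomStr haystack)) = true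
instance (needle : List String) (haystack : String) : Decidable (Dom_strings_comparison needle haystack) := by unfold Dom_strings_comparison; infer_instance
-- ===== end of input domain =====

-- B replaces A's per-start-position common-prefix scan by growing the prefix length while it is
-- still a substring of the haystack, and dedups with sorted(set(...)) (objective: faster, constant factor).
-- NOTE: Python A mutates `needle` in place (new_needle aliases needle); the equivalence proved here is
-- about the RETURN value only (B does not mutate).

-- ===== PORT A =====
-- loop of find_longes_prefix; on [] returns the accumulated i (Python's `return i + 1` past the last
-- index; an empty template raises UnboundLocalError in Python — excluded by Pre_)
def flpGo (hs : List Char) (hlen b : Int) : List Char → Int → Int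
  | [], i => i
  | c :: rest, i =>
    if hlen > b + i then
      match PySem.List.pyGet? hs (b + i) with
      | some hc => if c ≠ hc then i else flpGo hs hlen b rest (i + 1)
      | none => i   -- unreachable: the guard gives 0 ≤ b + i < hlen = hs.length
    else i

def find_longes_prefix (template_string : List Char) (hs : List Char) (b hlen : Int) : Int :=
  flpGo hs hlen b template_string 0

-- [a[0] for a in itertools.groupby(xs)] : first element of each run of consecutive equal elements
def groupbyFirsts : List String → List String
  | [] => []
  | x :: xs => x :: groupbyFirsts (xs.dropWhile (· == x))
termination_by l => l.length
decreasing_by simpa using Nat.lt_succ_of_le (List.length_dropWhile_le _ _)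

-- Python's `for c, template_string in enumerate(needle)` reads needle[c] before mutating it, so the
-- iterated values are the original elements: fold over enumerate of the original list, updating in place.
-- body of one iteration of A's outer loop: new_needle[c] = template_string[:max(last_pos)]
def truncA (haystack : String) (template_string : String) : String :=
  let haystack_len : Int := PySem.Str.len haystack
  let last_pos := (PySem.List.pyRange 0 haystack_len 1).map
    (fun b => find_longes_prefix template_string.toList haystack.toList b haystack_len)
  -- max(last_pos): raises ValueError when haystack is empty — excluded by Pre_
  PySem.Str.slice template_string none (some ((PySem.List.max? last_pos (fun x => x)).getD 0))

def strings_comparison (needle : List String) (haystack : String) : List String :=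
  let newNeedle := (PySem.List.enumerate needle 0).foldl
    (fun cur p => PySem.List.pySetD cur p.1 (truncA haystack p.2)) needle
  groupbyFirsts (PySem.List.sorted newNeedle (fun x => x) false)

-- ===== PORT B =====
-- while k < len(s) and s[:k+1] in haystack: k += 1
def bestLenGo (s h : List Char) (k : Nat) : Nat → Nat
  | 0 => k
  | fuel + 1 =>
    if k < s.length ∧ PySem.Chars.isIn (s.take (k + 1)) h then bestLenGo s h (k + 1) fuel else k

def strings_comparison_alt (needle : List String) (haystack : String) : List String :=
  PySem.List.sorted
    (PySem.Set.ofList (needle.map (fun s =>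
      String.ofList (s.toList.take (bestLenGo s.toList haystack.toList 0 s.toList.length)))))   -- s[:k]
    (fun x => x) false

-- ===== PRECONDITION & SPEC =====
-- Pre_ excludes exactly the inputs where Python A raises: an empty needle list (new_needle unbound),
-- an empty haystack (max([]) ValueError), or an empty needle string (UnboundLocalError in find_longes_prefix).
def Pre_strings_comparison (needle : List String) (haystack : String) : Prop :=
  needle ≠ [] ∧ haystack ≠ "" ∧ ∀ s ∈ needle, s ≠ ""
instance (needle : List String) (haystack : String) : Decidable (Pre_strings_comparison needle haystack) := by
  unfold Pre_strings_comparison; infer_instance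

def pvWitness_strings_comparison : List String × String := (["abc", "bc", "zb"], "abd")

def Spec_strings_comparison (needle : List String) (haystack : String) (out : List String) : Prop :=
  out = strings_comparison_alt needle haystack
instance (needle : List String) (haystack : String) (out : List String) : Decidable (Spec_strings_comparison needle haystack out) := by
  unfold Spec_strings_comparison; infer_instance

-- ===== CLAIM (what is proved, stated in full; the proofs are below) =====
def Claim_equal_strings_comparison : Prop := ∀ (needle : List String) (haystack : String), Dom_strings_comparison needle haystack → Pre_strings_comparison needle haystack → Spec_strings_comparison needle haystack (strings_comparison needle haystack)

-- ===== LEMMAS AND PROOFS =====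

-- length of the longest common prefix of two character lists
def lcpLen : List Char → List Char → Nat
  | c :: s, d :: t => if c = d then lcpLen s t + 1 else 0
  | _, _ => 0

theorem flpGo_eq (hs : List Char) (b : Nat) (tmpl : List Char) : ∀ (i : Nat),
    flpGo hs (hs.length : Int) (b : Int) tmpl (i : Int)
      = (i : Int) + (lcpLen tmpl (hs.drop (b + i)) : Int) := by
  induction tmpl with
  | nil => intro i; simp [flpGo, lcpLen]
  | cons c rest ih =>
    intro i
    rw [flpGo]
    by_cases hbi : b + i < hs.length
    · rw [if_pos (by push_cast; omega)]
      have hget : PySem.List.pyGet? hs ((b : Int) + (i : Int)) = some hs[b + i] := by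
        rw [show ((b : Int) + (i : Int)) = ((b + i : Nat) : Int) by push_cast; ring,
          PySem.List.pyGet?_natCast, List.getElem?_eq_getElem hbi]
      rw [hget]
      have hdrop : hs.drop (b + i) = hs[b + i] :: hs.drop (b + i + 1) :=
        List.drop_eq_getElem_cons hbi
      rw [hdrop]
      by_cases hc : c = hs[b + i]
      · simp only [hc, ne_eq, not_true_eq_false, if_false, lcpLen, if_pos rfl]
        have := ih (i + 1)
        push_cast at this ⊢
        rw [show b + (i + 1) = b + i + 1 by ring] at this
        rw [this]; ring
      · simp [hc, lcpLen]
    · rw [if_neg (by push_cast; omega)]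
      rw [List.drop_eq_nil_of_le (by omega)]
      simp [lcpLen]

theorem lcpLen_le_left (s t : List Char) : lcpLen s t ≤ s.length := by
  induction s generalizing t with
  | nil => simp [lcpLen]
  | cons c s ih =>
    cases t with
    | nil => simp [lcpLen]
    | cons d t =>
      simp only [lcpLen]
      split <;> simp [Nat.succ_le_succ (ih t)]

theorem take_lcpLen_eq (s t : List Char) : s.take (lcpLen s t) = t.take (lcpLen s t) := by
  induction s generalizing t with
  | nil => simp [lcpLen]
  | cons c s ih =>
    cases t with
    | nil => simp [lcpLen]
    | cons d t =>
      simp only [lcpLen]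
      split
      · next h => simp [h, ih t]
      · simp

theorem lcpLen_ge_of_take_eq (s t : List Char) (k : Nat) (hk : k ≤ s.length)
    (h : s.take k = t.take k) : k ≤ lcpLen s t := by
  induction s generalizing t k with
  | nil =>
    simp only [List.length_nil, Nat.le_zero] at hk
    simp [hk]
  | cons c s ih =>
    cases k with
    | zero => exact Nat.zero_le _
    | succ k =>
      cases t with
      | nil => simp at h
      | cons d t =>
        simp only [List.take_succ_cons, List.cons.injEq] at h
        simp only [lcpLen, h.1, if_pos]
        exact Nat.succ_le_succ (ih t k (by simpa using hk) h.2)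

theorem bestLenGo_spec (s h : List Char) : ∀ (fuel k : Nat), k ≤ s.length →
    s.length ≤ k + fuel → s.take k <:+: h →
    bestLenGo s h k fuel ≤ s.length ∧ s.take (bestLenGo s h k fuel) <:+: h ∧
      (bestLenGo s h k fuel = s.length ∨ ¬ (s.take (bestLenGo s h k fuel + 1) <:+: h)) := by
  intro fuel
  induction fuel with
  | zero =>
    intro k hk hfuel hinf
    have : k = s.length := by omega
    exact ⟨hk, hinf, Or.inl this⟩
  | succ fuel ih =>
    intro k hk hfuel hinf
    rw [bestLenGo]
    by_cases hcond : k < s.length ∧ PySem.Chars.isIn (s.take (k + 1)) h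
    · rw [if_pos hcond]
      exact ih (k + 1) (by omega) (by omega) ((PySem.Chars.isIn_iff_infix _ _).mp hcond.2)
    · rw [if_neg hcond]
      refine ⟨hk, hinf, ?_⟩
      by_cases hlen : k = s.length
      · exact Or.inl hlen
      · right
        intro habs
        exact hcond ⟨by omega, (PySem.Chars.isIn_iff_infix _ _).mpr habs⟩

theorem max_lcp_eq_bestLen (s hs : List Char) (hH : hs ≠ []) :
    (PySem.List.max? ((PySem.List.pyRange 0 (hs.length : Int) 1).map
        (fun b => find_longes_prefix s hs b (hs.length : Int))) (fun x => x))
      = some ((bestLenGo s hs 0 s.length : Nat) : Int) := by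
  set f : Int → Int := fun b => find_longes_prefix s hs b (hs.length : Int) with hf
  set L := (PySem.List.pyRange 0 (hs.length : Int) 1).map f with hL
  set K := bestLenGo s hs 0 s.length with hK
  have hKspec := bestLenGo_spec s hs s.length 0 (Nat.zero_le _) (by omega)
    (by simp [List.nil_infix])
  -- f at a Nat start position is the lcp length there
  have hfval : ∀ (bn : Nat), f (bn : Int) = ((lcpLen s (hs.drop bn) : Nat) : Int) := by
    intro bn
    have := flpGo_eq hs bn s 0
    simpa [hf, find_longes_prefix] using this
  have hlenpos : 0 < hs.length := List.length_pos_of_ne_nil hH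
  -- L is nonempty
  have hLne : L ≠ [] := by
    simp [hL, List.map_eq_nil_iff]
    intro habs
    have := PySem.List.length_pyRange_one (0 : Int) (hs.length : Int)
    rw [habs] at this
    simp at this
    omega
  obtain ⟨m, hm⟩ : ∃ m, PySem.List.max? L (fun x => x) = some m := by
    cases hmo : PySem.List.max? L (fun x => x) with
    | none => exact absurd ((PySem.List.max?_eq_none_iff _ _).mp hmo) hLne
    | some m => exact ⟨m, rfl⟩
  have hmax := PySem.List.max?_isMax hm
  have hmem := PySem.List.max?_mem hm
  -- every element of L is ≤ K
  have hle : ∀ y ∈ L, y ≤ (K : Int) := by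
    intro y hy
    rw [hL] at hy
    obtain ⟨b, hb, rfl⟩ := List.mem_map.mp hy
    rw [PySem.List.mem_pyRange_one] at hb
    obtain ⟨hb0, hbH⟩ := hb
    set bn := b.toNat with hbn
    have hbeq : b = (bn : Int) := by omega
    rw [hbeq, hfval bn]
    -- lcpLen s (hs.drop bn) ≤ K
    have hinf : s.take (lcpLen s (hs.drop bn)) <:+: hs := by
      rw [take_lcpLen_eq]
      exact (List.take_prefix _ _).isInfix.trans (List.drop_suffix _ _).isInfix
    have : lcpLen s (hs.drop bn) ≤ K := by
      by_contra habs
      push_neg at habs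
      have hlt : K < s.length := lt_of_lt_of_le habs (lcpLen_le_left _ _)
      rcases hKspec.2.2 with heq | hni
      · omega
      · exact hni ((List.take_prefix_take_left (by omega)).isInfix.trans hinf)
    exact_mod_cast this
  -- some position realises at least K
  have hge : (K : Int) ≤ m := by
    by_cases hK0 : K = 0
    · have h0 : f (0 : Int) ∈ L := by
        rw [hL]
        exact List.mem_map_of_mem (by rw [PySem.List.mem_pyRange_one]; omega)
      have := hmax _ h0
      have h0v := hfval 0
      simp only [Nat.cast_zero] at h0v
      rw [h0v] at this
      simp only [hK0, Nat.cast_zero]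
      calc (0 : Int) ≤ ((lcpLen s (hs.drop 0) : Nat) : Int) := by positivity
        _ ≤ m := this
    · obtain ⟨u, v, huv⟩ := hKspec.2.1
      have hKs : K ≤ s.length := hKspec.1
      have hlenK : (s.take K).length = K := by simp [hKs]
      set bn := u.length with hbn
      have hbH : bn < hs.length := by
        have := congrArg List.length huv
        simp [hlenK] at this
        omega
      have hdrop : hs.drop bn = s.take K ++ v := by
        rw [← huv, List.append_assoc, List.drop_left]
      have hlcp : K ≤ lcpLen s (hs.drop bn) := by
        apply lcpLen_ge_of_take_eq s _ K hKs
        rw [hdrop, List.take_left' hlenK]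
      have hfb : f (bn : Int) ∈ L := by
        rw [hL]
        exact List.mem_map_of_mem (by rw [PySem.List.mem_pyRange_one]; omega)
      have := hmax _ hfb
      rw [hfval bn] at this
      have : (K : Int) ≤ ((lcpLen s (hs.drop bn) : Nat) : Int) := by exact_mod_cast hlcp
      omega
  have : m = (K : Int) := le_antisymm (hle m hmem) hge
  rw [hm, this]

-- groupbyFirsts facts
theorem groupbyFirsts_sublist : ∀ (l : List String), List.Sublist (groupbyFirsts l) l
  | [] => by rw [groupbyFirsts]
  | x :: xs => by
    rw [groupbyFirsts]
    exact ((groupbyFirsts_sublist (xs.dropWhile (· == x))).trans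
      (List.dropWhile_sublist _)).cons₂ x
termination_by l => l.length
decreasing_by simpa using Nat.lt_succ_of_le (List.length_dropWhile_le _ _)

theorem mem_groupbyFirsts : ∀ (l : List String) (a : String), a ∈ l → a ∈ groupbyFirsts l
  | [], a, ha => absurd ha (by simp)
  | x :: xs, a, ha => by
    rw [groupbyFirsts]
    rcases List.mem_cons.mp ha with rfl | hxs
    · exact List.mem_cons_self
    · by_cases hd : a ∈ xs.dropWhile (· == x)
      · exact List.mem_cons_of_mem _ (mem_groupbyFirsts _ a hd)
      · have hat : a ∈ xs.takeWhile (· == x) := by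
          have h := List.takeWhile_append_dropWhile (p := (· == x)) (l := xs)
          rw [← h] at hxs
          rcases List.mem_append.mp hxs with h' | h'
          · exact h'
          · exact absurd h' hd
        have hax := List.mem_takeWhile_imp hat
        rw [beq_iff_eq] at hax
        rw [hax]
        exact List.mem_cons_self
termination_by l => l.length
decreasing_by simpa using Nat.lt_succ_of_le (List.length_dropWhile_le _ _)

theorem groupbyFirsts_pairwise_lt : ∀ (l : List String),
    l.Pairwise (· ≤ ·) → (groupbyFirsts l).Pairwise (· < ·)
  | [], _ => by rw [groupbyFirsts]; exact List.Pairwise.nil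
  | x :: xs, hl => by
    rw [groupbyFirsts]
    obtain ⟨hxle, hxs⟩ := List.pairwise_cons.mp hl
    have hdpair : (xs.dropWhile (· == x)).Pairwise (· ≤ ·) :=
      List.Pairwise.sublist (List.dropWhile_sublist _) hxs
    refine List.pairwise_cons.mpr ⟨?_, groupbyFirsts_pairwise_lt _ hdpair⟩
    intro y hy
    have hyd : y ∈ xs.dropWhile (· == x) := (groupbyFirsts_sublist _).subset hy
    cases hd : xs.dropWhile (· == x) with
    | nil => rw [hd] at hyd; simp at hyd
    | cons z zs =>
      have hw : xs.dropWhile (· == x) ≠ [] := by rw [hd]; simp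
      have hz : (z == x) = false := by
        have h := List.head_dropWhile_not (· == x) hw
        simpa [hd] using h
      rw [beq_eq_false_iff_ne] at hz
      have hzmem : z ∈ xs := (List.dropWhile_sublist _).subset (by rw [hd]; simp)
      have hxz : x < z := lt_of_le_of_ne (hxle z hzmem) (Ne.symm hz)
      rw [hd] at hyd
      rcases List.mem_cons.mp hyd with rfl | hyzs
      · exact hxz
      · rw [hd] at hdpair
        exact hxz.trans_le ((List.pairwise_cons.mp hdpair).1 y hyzs)
termination_by l => l.length
decreasing_by simpa using Nat.lt_succ_of_le (List.length_dropWhile_le _ _)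

-- the fold of in-place updates over enumerate IS map
theorem foldl_setD_enumerate (f : String → String) :
    ∀ (rest done : List String),
      (PySem.List.enumerate rest (done.length : Int)).foldl
        (fun cur p => PySem.List.pySetD cur p.1 (f p.2)) (done ++ rest)
      = done ++ rest.map f := by
  intro rest
  induction rest with
  | nil => intro done; simp [PySem.List.enumerate_nil]
  | cons x rest ih =>
    intro done
    rw [PySem.List.enumerate_cons, List.foldl_cons]
    have hlt : done.length < (done ++ x :: rest).length := by simp
    have hset : PySem.List.pySetD (done ++ x :: rest) ((done.length : Nat) : Int) (f x)
        = done ++ f x :: rest := by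
      rw [PySem.List.pySetD, PySem.List.pySet?_natCast _ _ _ hlt, Option.getD_some, List.set_append]
      simp
    rw [hset]
    have h1 : done ++ f x :: rest = (done ++ [f x]) ++ rest := by simp
    have h2 : (done.length : Int) + 1 = (((done ++ [f x]).length : Nat) : Int) := by
      simp
    rw [h1, h2, ih (done ++ [f x])]
    simp

-- ===== VERDICT (by name: the statement is the Claim_ definition above) =====
theorem strings_comparison_spec : Claim_equal_strings_comparison := by
  intro needle haystack _hdom hpre
  obtain ⟨-, hhay, -⟩ := hpre
  have hhs : haystack.toList ≠ [] := by
    intro h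
    apply hhay
    have := congrArg String.ofList h
    rwa [String.ofList_toList] at this
  unfold Spec_strings_comparison strings_comparison strings_comparison_alt
  -- the fold of in-place updates is a map of the per-needle truncation
  have hfold : (PySem.List.enumerate needle 0).foldl
      (fun cur p => PySem.List.pySetD cur p.1 (truncA haystack p.2)) needle
      = needle.map (truncA haystack) := by
    have h := foldl_setD_enumerate (truncA haystack) needle []
    simpa using h
  -- the per-needle values agree
  have hptwise : ∀ s, truncA haystack s
      = String.ofList (s.toList.take (bestLenGo s.toList haystack.toList 0 s.toList.length)) := by
    intro s
    have hlen : PySem.Str.len haystack = (haystack.toList.length : Int) := by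
      simp [pysem]
    simp only [truncA, hlen]
    rw [max_lcp_eq_bestLen s.toList haystack.toList hhs, Option.getD_some]
    apply String.toList_inj.mp
    simp only [PySem.Str.toList_slice, PySem.Chars.slice_eq_listSlice, String.toList_ofList]
    rw [PySem.List.slice_to _ (Int.natCast_nonneg _), Int.toNat_natCast]
  have hmap : needle.map (truncA haystack)
      = needle.map (fun s => String.ofList (s.toList.take (bestLenGo s.toList haystack.toList 0 s.toList.length))) :=
    List.map_congr_left (fun s _ => hptwise s)
  simp only [hfold, hmap]
  -- [a[0] for a in groupby(sorted(xs))] = sorted(set(xs))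
  set xs := needle.map (fun s => String.ofList (s.toList.take (bestLenGo s.toList haystack.toList 0 s.toList.length))) with hxs
  have hpairS : (PySem.List.sorted xs (fun x => x) false).Pairwise (· ≤ ·) := by
    simpa using PySem.List.sorted_pairwise xs (fun x => x)
  have hpairR := groupbyFirsts_pairwise_lt _ hpairS
  have hmemR : ∀ a, a ∈ groupbyFirsts (PySem.List.sorted xs (fun x => x) false)
      ↔ a ∈ PySem.Set.ofList xs := by
    intro a
    constructor
    · intro h
      exact (PySem.Set.mem_ofList _ _).mpr
        ((PySem.List.mem_sorted _ _ _ _).mp ((groupbyFirsts_sublist _).subset h))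
    · intro h
      exact mem_groupbyFirsts _ _
        ((PySem.List.mem_sorted _ _ _ _).mpr ((PySem.Set.mem_ofList _ _).mp h))
  have hperm : (groupbyFirsts (PySem.List.sorted xs (fun x => x) false)).Perm (PySem.Set.ofList xs) :=
    (List.perm_ext_iff_of_nodup (hpairR.imp (fun h => ne_of_lt h)) (PySem.Set.nodup_ofList _)).mpr hmemR
  exact (PySem.List.sorted_eq_of_perm_of_pairwise_lt _ _ (fun x => x) hperm hpairR).symm
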